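-- pv_equiv track=rewrite | github.com/pypi-data/pypi-mirror-43 | packages/radinitio/radinitio-0.9.1.tar.gz/radinitio-0.9.1/radinitio/__init__.py | get_duplicate_only_distrib
-- ===== SOURCE A (Python) =====
-- def get_duplicate_only_distrib(seq_clone_errors_freq, seq_clone_errors_vals):
--     dup_distrib = {}
--     # Iterate over the clone+error distribution and sum all frequencies for a given clone size
--     for i in range(len(seq_clone_errors_freq)):
--         clone_size = seq_clone_errors_vals[i][0]
--         dup_distrib.setdefault(clone_size, 0)
--         dup_distrib[clone_size] += seq_clone_errors_freq[i]
--     dup_distrib = [ dup_distrib[clone_size] for clone_size in sorted(dup_distrib.keys()) ]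
--     # Return a list containing the per-sequenced clone size frequencies
--     return dup_distrib
-- ===== SOURCE B (Python) =====
-- def get_duplicate_only_distrib(seq_clone_errors_freq, seq_clone_errors_vals):
--     # Sort (clone_size, freq) pairs by clone size, then one pass with a running
--     # group sum, flushing whenever the clone size changes.
--     pairs = sorted(((v[0], f) for f, v in zip(seq_clone_errors_freq, seq_clone_errors_vals)),
--                    key=lambda p: p[0])
--     out = []
--     cur_key = None
--     cur_sum = 0
--     for k, f in pairs:
--         if cur_key is not None and k == cur_key:
--             cur_sum += f
--         else:
--             if cur_key is not None:
--                 out.append(cur_sum)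
--             cur_key, cur_sum = k, f
--     if cur_key is not None:
--         out.append(cur_sum)
--     return out
-- ===== Notes on version B (the rewrite author's own statement) =====
-- stated objective: alternative
-- what changed: Replaces the dict-accumulation plus key-sort with sort-then-group: zip the two lists into (clone_size, freq) pairs, sort by clone size, and sum each run of equal keys in a single pass with a running accumulator.
import Mathlib
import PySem

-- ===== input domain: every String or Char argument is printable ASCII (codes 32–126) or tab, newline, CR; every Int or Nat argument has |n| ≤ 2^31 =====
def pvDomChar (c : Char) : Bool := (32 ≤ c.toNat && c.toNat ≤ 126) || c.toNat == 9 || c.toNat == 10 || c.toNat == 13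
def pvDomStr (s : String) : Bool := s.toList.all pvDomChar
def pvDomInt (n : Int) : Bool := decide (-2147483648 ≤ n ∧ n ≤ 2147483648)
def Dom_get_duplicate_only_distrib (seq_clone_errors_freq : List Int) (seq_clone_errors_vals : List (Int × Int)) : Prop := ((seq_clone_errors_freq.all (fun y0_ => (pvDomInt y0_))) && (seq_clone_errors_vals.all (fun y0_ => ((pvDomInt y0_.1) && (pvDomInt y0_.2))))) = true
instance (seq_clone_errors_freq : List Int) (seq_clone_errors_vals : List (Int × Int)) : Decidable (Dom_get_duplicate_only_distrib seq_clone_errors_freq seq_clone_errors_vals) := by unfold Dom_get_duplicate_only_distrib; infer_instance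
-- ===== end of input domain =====

-- B replaces A's dict accumulation + key sort by sort-then-group (zip, sort by clone size,
-- one pass summing runs of equal keys); objective: alternative (same asymptotic cost).

-- ===== PORT A =====
def get_duplicate_only_distrib (seq_clone_errors_freq : List Int) (seq_clone_errors_vals : List (Int × Int)) : List Int :=
  let dup_distrib : PySem.Dict Int Int :=
    (PySem.List.pyRange 0 (seq_clone_errors_freq.length : Int) 1).foldl
      (fun d i =>
        let clone_size := (PySem.List.pyGetD seq_clone_errors_vals i (0, 0)).1
        let d := d.setdefault clone_size 0
        d.insert clone_size (d.getD clone_size 0 + PySem.List.pyGetD seq_clone_errors_freq i 0))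
      PySem.Dict.empty
  (PySem.List.sorted dup_distrib.keys (fun k => k)).map (fun clone_size => dup_distrib.getD clone_size 0)

-- ===== PORT B =====
-- one pass over the (already sorted) pairs: accumulate the current group's sum, flush on key change
def pvAltGroup (k : Int) (s : Int) : List (Int × Int) → List Int
  | [] => [s]
  | (k', f) :: rest => if k' = k then pvAltGroup k (s + f) rest else s :: pvAltGroup k' f rest

def get_duplicate_only_distrib_alt (seq_clone_errors_freq : List Int) (seq_clone_errors_vals : List (Int × Int)) : List Int :=
  let pairs := PySem.List.sorted
      ((seq_clone_errors_freq.zip seq_clone_errors_vals).map (fun p => (p.2.1, p.1)))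
      (fun p => p.1)
  match pairs with
  | [] => []
  | (k, f) :: rest => pvAltGroup k f rest

-- ===== PRECONDITION & SPEC =====
-- A indexes seq_clone_errors_vals[i] for every i < len(seq_clone_errors_freq): it raises
-- IndexError when the vals list is shorter; exactly those inputs are excluded (B's zip
-- truncates there and returns the grouped sums of the overlapping prefix instead).
def Pre_get_duplicate_only_distrib (seq_clone_errors_freq : List Int) (seq_clone_errors_vals : List (Int × Int)) : Prop :=
  seq_clone_errors_freq.length ≤ seq_clone_errors_vals.length
instance (seq_clone_errors_freq : List Int) (seq_clone_errors_vals : List (Int × Int)) : Decidable (Pre_get_duplicate_only_distrib seq_clone_errors_freq seq_clone_errors_vals) := by unfold Pre_get_duplicate_only_distrib; infer_instance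

def pvWitness_get_duplicate_only_distrib : List Int × (List (Int × Int)) := ([2, 3, 4], [(1, 0), (2, 0), (1, 7)])

def Spec_get_duplicate_only_distrib (seq_clone_errors_freq : List Int) (seq_clone_errors_vals : List (Int × Int)) (out : List Int) : Prop := out = get_duplicate_only_distrib_alt seq_clone_errors_freq seq_clone_errors_vals
instance (seq_clone_errors_freq : List Int) (seq_clone_errors_vals : List (Int × Int)) (out : List Int) : Decidable (Spec_get_duplicate_only_distrib seq_clone_errors_freq seq_clone_errors_vals out) := by unfold Spec_get_duplicate_only_distrib; infer_instance

-- ===== CLAIM (what is proved, stated in full; the proofs are below) =====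
def Claim_equal_get_duplicate_only_distrib : Prop := ∀ (seq_clone_errors_freq : List Int) (seq_clone_errors_vals : List (Int × Int)), Dom_get_duplicate_only_distrib seq_clone_errors_freq seq_clone_errors_vals → Pre_get_duplicate_only_distrib seq_clone_errors_freq seq_clone_errors_vals → Spec_get_duplicate_only_distrib seq_clone_errors_freq seq_clone_errors_vals (get_duplicate_only_distrib seq_clone_errors_freq seq_clone_errors_vals)
-- ===== LEMMAS AND PROOFS =====

def pvStepA (d : PySem.Dict Int Int) (p : Int × (Int × Int)) : PySem.Dict Int Int :=
  let d' := d.setdefault p.2.1 0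
  d'.insert p.2.1 (d'.getD p.2.1 0 + p.1)

theorem pvGetD_stepA (d : PySem.Dict Int Int) (p : Int × (Int × Int)) (c : Int) :
    (pvStepA d p).getD c 0 = if c = p.2.1 then d.getD c 0 + p.1 else d.getD c 0 := by
  unfold pvStepA
  rw [PySem.Dict.getD_insert]
  split_ifs with h
  · rw [PySem.Dict.getD_setdefault_self, h]
  · rw [PySem.Dict.getD_eq_get?_getD, PySem.Dict.get?_setdefault_of_ne _ _ h,
      ← PySem.Dict.getD_eq_get?_getD]

theorem pvKeys_stepA (d : PySem.Dict Int Int) (p : Int × (Int × Int)) :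
    (pvStepA d p).keys = PySem.Set.add d.keys p.2.1 := by
  unfold pvStepA
  rw [PySem.Dict.keys_insert_of_contains _ _ (by rw [PySem.Dict.contains_setdefault]; simp),
    PySem.Dict.keys_setdefault, PySem.Set.add_eq_ite]
  by_cases hm : p.2.1 ∈ d.keys
  · rw [if_pos ((PySem.Dict.contains_iff_mem_keys _ _).2 hm), if_pos hm]
  · rw [if_neg (fun hc => hm ((PySem.Dict.contains_iff_mem_keys _ _).1 hc)), if_neg hm]

theorem pvGetD_foldl_stepA (l : List (Int × (Int × Int))) (d : PySem.Dict Int Int) (c : Int) :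
    (l.foldl pvStepA d).getD c 0
      = d.getD c 0 + ((l.filter (fun p => p.2.1 = c)).map (·.1)).sum := by
  induction l generalizing d with
  | nil => simp
  | cons p t ih =>
    rw [List.foldl_cons, ih, pvGetD_stepA, List.filter_cons]
    by_cases h : p.2.1 = c
    · simp [h]; ring
    · simp [h]; intro hc; exact absurd hc.symm h

theorem pvKeys_foldl_stepA (l : List (Int × (Int × Int))) (d : PySem.Dict Int Int) :
    (l.foldl pvStepA d).keys = PySem.Set.update d.keys (l.map (fun p => p.2.1)) := by
  induction l generalizing d with
  | nil => simp [PySem.Set.update_nil]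
  | cons p t ih =>
    rw [List.foldl_cons, ih, pvKeys_stepA, List.map_cons, PySem.Set.update_cons]

theorem pvOfList_pairwise {r : Int → Int → Prop} (l : List Int) (h : l.Pairwise r) :
    (PySem.Set.ofList l).Pairwise r := by
  induction l with
  | nil => simp [PySem.Set.ofList_nil]
  | cons x xs ih =>
    rw [PySem.Set.ofList_cons]
    rcases List.pairwise_cons.1 h with ⟨hx, ht⟩
    refine List.pairwise_cons.2 ⟨fun y hy => ?_, ?_⟩
    · exact hx y ((PySem.Set.mem_ofList xs y).1 ((PySem.Set.mem_discard _ _ _).1 hy).1)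
    · rw [PySem.Set.discard.eq_1]
      exact List.Pairwise.filter _ (ih ht)
theorem pvDedup_cons_cons (k : Int) (m : List Int) :
    PySem.List.dedup (k :: k :: m) = PySem.List.dedup (k :: m) := by
  simp [PySem.List.dedup_eq_ofList, PySem.Set.ofList_cons, PySem.Set.discard.eq_1,
    List.filter_filter]

theorem pvDedup_cons_of_not_mem (k : Int) (m : List Int) (h : ∀ x ∈ m, x ≠ k) :
    PySem.List.dedup (k :: m) = k :: PySem.List.dedup m := by
  simp only [PySem.List.dedup_eq_ofList, PySem.Set.ofList_cons, PySem.Set.discard.eq_1]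
  congr 1
  apply List.filter_eq_self.2
  intro a ha
  simp [h a ((PySem.Set.mem_ofList m a).1 ha)]

theorem pvAltGroup_spec (rest : List (Int × Int)) (k s : Int)
    (hp : rest.Pairwise (fun a b => a.1 ≤ b.1)) (hk : ∀ p ∈ rest, k ≤ p.1) :
    pvAltGroup k s rest
      = (PySem.List.dedup (k :: rest.map (·.1))).map
          (fun c => (if c = k then s else 0) + ((rest.filter (fun p => p.1 = c)).map (·.2)).sum) := by
  induction rest generalizing k s with
  | nil =>
    simp [pvAltGroup, PySem.List.dedup_eq_ofList, PySem.Set.ofList_cons, PySem.Set.ofList_nil,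
      PySem.Set.discard.eq_1]
  | cons q t ih =>
    obtain ⟨k', f⟩ := q
    rcases List.pairwise_cons.1 hp with ⟨hkt', hpt⟩
    simp only [pvAltGroup]
    by_cases h : k' = k
    · subst h
      rw [if_pos rfl]
      rw [ih k' (s + f) hpt (by intro p hp'; exact hkt' p hp'), List.map_cons]
      rw [pvDedup_cons_cons]
      apply List.map_congr_left
      intro c _
      rw [List.filter_cons]
      by_cases hc : c = k'
      · subst hc; simp; ring
      · have hne' : ¬((k', f).1 = c) := fun e => hc e.symm
        simp [hne', hc]
    · have hlt : k < k' := lt_of_le_of_ne (hk _ (List.mem_cons_self)) (fun e => h e.symm)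
      rw [if_neg h]
      rw [ih k' f hpt hkt', List.map_cons]
      have hne : ∀ x ∈ (k' : Int) :: t.map (·.1), x ≠ k := by
        intro x hx
        rcases List.mem_cons.1 hx with rfl | hx
        · omega
        · rcases List.mem_map.1 hx with ⟨p, hpmem, rfl⟩
          have := hkt' p hpmem; omega
      rw [pvDedup_cons_of_not_mem k _ hne, List.map_cons]
      congr 1
      · -- head: F k = s
        have : List.filter (fun p => decide (p.1 = k)) ((k', f) :: t) = [] := by
          apply List.filter_eq_nil_iff.2
          intro p hpmem
          rcases List.mem_cons.1 hpmem with rfl | hpm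
          · simp only [decide_eq_true_eq]; omega
          · have := hkt' p hpm; simp only [decide_eq_true_eq]; omega
        simp [this]
      · apply List.map_congr_left
        intro c hc
        have hck : c ≠ k := hne c ((PySem.List.mem_dedup _ _).1 hc)
        rw [List.filter_cons]
        by_cases hck' : c = k'
        · subst hck'; simp [hck]
        · have hne' : ¬((k', f).1 = c) := fun e => hck' e.symm
          simp [hne', hck, hck']

theorem pv_main (freq : List Int) (vals : List (Int × Int))
    (hpre : freq.length ≤ vals.length) :
    get_duplicate_only_distrib freq vals = get_duplicate_only_distrib_alt freq vals := by
  have hlen : (freq.zip vals).length = freq.length := by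
    rw [List.length_zip]; omega
  set zs := freq.zip vals with hzs
  set ps := zs.map (fun p => (p.2.1, p.1)) with hps
  set ks := zs.map (fun p => p.2.1) with hks
  have hpsks : ps.map (fun p => p.1) = ks := by
    simp [hps, hks, List.map_map, Function.comp]
  -- A's loop equals a fold of pvStepA over the zipped list
  have hfold :
      (PySem.List.pyRange 0 (freq.length : Int) 1).foldl
        (fun d i =>
          let clone_size := (PySem.List.pyGetD vals i (0, 0)).1
          let d := d.setdefault clone_size 0
          d.insert clone_size (d.getD clone_size 0 + PySem.List.pyGetD freq i 0))
        PySem.Dict.empty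
      = zs.foldl pvStepA PySem.Dict.empty := by
    rw [show ((freq.length : Nat) : Int) = (zs.length : Int) by exact_mod_cast hlen.symm]
    rw [← PySem.List.foldl_pyRange_zero_pyGetD' zs ((0 : Int), ((0 : Int), (0 : Int))) pvStepA PySem.Dict.empty]
    apply PySem.List.foldl_congr_mem
    intro acc i hi
    rcases (PySem.List.mem_pyRange_one).1 hi with ⟨h0, h1⟩
    have h1' : i < (zs.length : Int) := h1
    have hif : i.toNat < freq.length := by omega
    have hiv : i.toNat < vals.length := by omega
    have hiz : i.toNat < zs.length := by omega
    rw [PySem.List.pyGetD_eq_getElem vals _ h0 (by omega),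
      PySem.List.pyGetD_eq_getElem freq _ h0 (by omega),
      PySem.List.pyGetD_eq_getElem zs _ h0 (by omega)]
    simp [pvStepA, hzs, List.getElem_zip]
  simp only [get_duplicate_only_distrib, get_duplicate_only_distrib_alt, hfold]
  simp only [pvKeys_foldl_stepA, PySem.Dict.keys_empty, PySem.Set.update_nil_left,
    pvGetD_foldl_stepA, PySem.Dict.getD_empty, zero_add]
  -- per-key sums transported to the B side
  have hFG : ∀ c : Int,
      ((ps.filter (fun p => p.1 = c)).map (fun x => x.2)).sum
        = ((zs.filter (fun p => p.2.1 = c)).map (fun x => x.1)).sum := by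
    intro c
    simp [hps, List.filter_map, List.map_map, Function.comp_def]
  have hqperm : (PySem.List.sorted ps (fun p => p.1)).Perm ps := PySem.List.sorted_perm ps (fun p => p.1) false
  have hq : ∀ c : Int,
      (((PySem.List.sorted ps (fun p => p.1)).filter (fun p => p.1 = c)).map (fun x => x.2)).sum
        = ((zs.filter (fun p => p.2.1 = c)).map (fun x => x.1)).sum := by
    intro c
    rw [← hFG c]
    exact ((hqperm.filter _).map _).sum_eq
  cases hq0 : PySem.List.sorted ps (fun p => p.1) with
  | nil =>
    have hps0 : ps = [] := (PySem.List.sorted_eq_nil_iff ps (fun p => p.1) false).1 hq0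
    have hzs0 : zs = [] := List.map_eq_nil_iff.1 (hps ▸ hps0)
    rw [hzs0]
    rfl
  | cons q rest =>
    obtain ⟨k, f⟩ := q
    have hsp : (PySem.List.sorted ps (fun p => p.1)).Pairwise (fun a b => a.1 ≤ b.1) :=
      PySem.List.sorted_pairwise ps (fun p => p.1)
    rw [hq0] at hsp hqperm hq
    rcases List.pairwise_cons.1 hsp with ⟨hhead, htail⟩
    have hred : (match ((k, f) :: rest : List (Int × Int)) with
        | [] => ([] : List Int)
        | (k, f) :: rest => pvAltGroup k f rest) = pvAltGroup k f rest := rfl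
    rw [hred, pvAltGroup_spec rest k f htail hhead]
    -- identify the key lists
    have hkeys : PySem.List.dedup ((k : Int) :: rest.map (fun x => x.1))
        = PySem.List.sorted (PySem.Set.ofList (zs.map (fun p => p.2.1))) (fun x => x) := by
      have hmfst : ((k : Int) :: rest.map (fun x => x.1)) = ((k, f) :: rest).map (fun x => x.1) := by
        simp
      refine (PySem.List.sorted_eq_of_perm_of_pairwise_lt _ _ (fun x => x) ?_ ?_).symm
      · -- Perm
        apply (List.perm_ext_iff_of_nodup (PySem.List.nodup_dedup _) (PySem.Set.nodup_ofList _)).2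
        intro x
        rw [PySem.List.mem_dedup, PySem.Set.mem_ofList, hmfst]
        have h1 : x ∈ ((k, f) :: rest).map (fun x : Int × Int => x.1) ↔ x ∈ ps.map (fun x => x.1) :=
          (hqperm.map (fun x : Int × Int => x.1)).mem_iff
        rw [h1, hpsks]
      · -- strictly increasing
        have hle : (((k, f) :: rest).map (fun x : Int × Int => x.1)).Pairwise (fun a b => a ≤ b) := by
          rw [← hq0]
          exact PySem.List.sorted_map_key_pairwise ps (fun p => p.1)
        rw [hmfst, PySem.List.dedup_eq_ofList]
        have hle' := pvOfList_pairwise _ hle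
        have hnd : (PySem.Set.ofList (((k, f) :: rest).map (fun x : Int × Int => x.1))).Nodup :=
          PySem.Set.nodup_ofList _
        exact (hle'.and hnd).imp (fun h => lt_of_le_of_ne h.1 h.2)
    rw [hkeys]
    apply List.map_congr_left
    intro c _
    rw [← hq c, List.filter_cons]
    by_cases hck : c = k
    · subst hck; simp
    · have : ¬((k, f) : Int × Int).1 = c := fun e => hck e.symm
      simp [this, hck]

-- ===== VERDICT (by name: the statement is the Claim_ definition above) =====
theorem get_duplicate_only_distrib_spec : Claim_equal_get_duplicate_only_distrib := by
  intro freq vals _ hpre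
  unfold Spec_get_duplicate_only_distrib
  exact pv_main freq vals hpre
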